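-- pv_equiv track=rewrite | github.com/seasalamat/oligo-aligner | oligo-aligner2.py | align_oligo_to_ref
-- ===== SOURCE A (Python) =====
-- def align_oligo_to_ref(oligo, ref_seq):
--     """
--     Attempts to align the given oligo to the reference sequence.
--     First checks for an exact match using str.find.
--     If not found, scans the reference for any substring (of the same length as oligo)
--     that has exactly one mismatch.
--     Returns a tuple (position, mismatch_count) if found, otherwise (None, None).
--     """
--     # Try exact match
--     pos = ref_seq.find(oligo)
--     if pos != -1:
--         return pos, 0
--     # Try approximate match: allow exactly one mismatch
--     oligo_len = len(oligo)
--     for i in range(len(ref_seq) - oligo_len + 1):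
--         segment = ref_seq[i:i+oligo_len]
--         mismatches = sum(1 for a, b in zip(oligo, segment) if a != b)
--         if mismatches == 1:
--             return i, 1
--     return None, None
-- ===== SOURCE B (Python) =====
-- def align_oligo_to_ref(oligo, ref_seq):
--     """Single left-to-right scan: each window is checked with an inner loop that
--     bails out after the second mismatch; the first exact window is returned at
--     once (it is exactly what ref_seq.find(oligo) would give), the first
--     one-mismatch window is remembered and used only if no exact window exists."""
--     m = len(oligo)
--     near = None
--     for i in range(len(ref_seq) - m + 1):
--         d = 0
--         for j in range(m):
--             if oligo[j] != ref_seq[i + j]: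
--                 d += 1
--                 if d > 1:
--                     break
--         if d == 0:
--             return i, 0
--         if d == 1 and near is None:
--             near = i
--     if near is not None:
--         return near, 1
--     return None, None
-- ===== Notes on version B (the rewrite author's own statement) =====
-- stated objective: alternative
-- what changed: One combined scan replaces A's two passes (str.find plus a full-recount pass): each window's mismatch count is computed with early exit after the second mismatch, the first exact hit returns immediately and the first one-mismatch hit is remembered as a fallback.
import Mathlib
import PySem

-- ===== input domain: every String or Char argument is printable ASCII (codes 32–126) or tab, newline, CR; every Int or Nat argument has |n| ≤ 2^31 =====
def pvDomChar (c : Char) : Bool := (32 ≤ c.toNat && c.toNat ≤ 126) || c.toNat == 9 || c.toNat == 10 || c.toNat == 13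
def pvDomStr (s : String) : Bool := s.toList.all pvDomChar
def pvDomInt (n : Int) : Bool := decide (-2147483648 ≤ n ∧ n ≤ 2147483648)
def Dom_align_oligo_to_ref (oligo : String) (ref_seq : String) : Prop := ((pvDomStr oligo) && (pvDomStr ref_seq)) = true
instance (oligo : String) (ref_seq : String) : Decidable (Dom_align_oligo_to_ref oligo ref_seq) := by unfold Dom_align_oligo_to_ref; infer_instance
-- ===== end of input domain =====

-- B replaces A's two passes (str.find, then a full-recount mismatch pass) by one combined scan
-- with an early-exit mismatch counter; same return value everywhere (objective: alternative).


-- ===== PORT A =====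
-- mismatches = sum(1 for a, b in zip(oligo, segment) if a != b)
def pvMisA (o seg : List Char) : Int :=
  (((o.zip seg).filter (fun p => p.1 != p.2)).map (fun _ => (1 : Int))).sum

-- A's 'for i in range(len(ref_seq) - oligo_len + 1)' loop with its early return
def pvLoopA (o r : List Char) : List Int → Option Int × Option Int
  | [] => (none, none)
  | i :: rest =>
    let segment := PySem.List.slice r (some i) (some (i + (o.length : Int)))
    if pvMisA o segment = 1 then (some i, some 1) else pvLoopA o r rest

def align_oligo_to_ref (oligo : String) (ref_seq : String) : Option Int × Option Int :=
  let pos := PySem.Str.find ref_seq oligo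
  if pos ≠ -1 then (some pos, some 0)
  else
    pvLoopA oligo.toList ref_seq.toList
      (PySem.List.pyRange 0 ((ref_seq.toList.length : Int) - (oligo.toList.length : Int) + 1) 1)

-- ===== PORT B =====
-- B's inner loop: count mismatches of the window starting at i, breaking as soon as d > 1
def pvDCap (o w : List Char) (d : Nat) : Nat :=
  match o, w with
  | a :: as, b :: bs =>
    if a ≠ b then (if d + 1 > 1 then d + 1 else pvDCap as bs (d + 1)) else pvDCap as bs d
  | _, _ => d

-- B's single scan, carrying 'near' (first one-mismatch hit so far)
def pvLoopB (o r : List Char) (near : Option Int) : List Nat → Option Int × Option Int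
  | [] => match near with
          | some n => (some n, some 1)
          | none => (none, none)
  | i :: rest =>
    let d := pvDCap o ((r.drop i).take o.length) 0
    if d = 0 then (some (i : Int), some 0)
    else if d = 1 ∧ near = none then pvLoopB o r (some (i : Int)) rest
    else pvLoopB o r near rest

def align_oligo_to_ref_alt (oligo : String) (ref_seq : String) : Option Int × Option Int :=
  pvLoopB oligo.toList ref_seq.toList none
    (List.range (ref_seq.toList.length + 1 - oligo.toList.length))

-- ===== PRECONDITION & SPEC =====
def Spec_align_oligo_to_ref (oligo : String) (ref_seq : String) (out : Option Int × Option Int) : Prop := out = align_oligo_to_ref_alt oligo ref_seq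
instance (oligo : String) (ref_seq : String) (out : Option Int × Option Int) : Decidable (Spec_align_oligo_to_ref oligo ref_seq out) := by unfold Spec_align_oligo_to_ref; infer_instance

-- ===== CLAIM (what is proved, stated in full; the proofs are below) =====
def Claim_equal_align_oligo_to_ref : Prop := ∀ (oligo : String) (ref_seq : String), Dom_align_oligo_to_ref oligo ref_seq → Spec_align_oligo_to_ref oligo ref_seq (align_oligo_to_ref oligo ref_seq)

-- ===== LEMMAS AND PROOFS =====

-- exact (uncapped) mismatch count of one window
def pvMis (o w : List Char) : Nat := (o.zip w).countP (fun p => p.1 != p.2)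

lemma pvMis_nil (w : List Char) : pvMis [] w = 0 := by simp [pvMis]

lemma pvMis_nil' (o : List Char) : pvMis o [] = 0 := by cases o <;> simp [pvMis]

lemma pvMis_cons (a b : Char) (as bs : List Char) :
    pvMis (a :: as) (b :: bs) = (if a = b then 0 else 1) + pvMis as bs := by
  simp only [pvMis, List.zip_cons_cons, List.countP_cons]
  by_cases hab : a = b <;> simp [hab] <;> omega

-- the early-exit counter computes min(mismatches + d, 2)
lemma pvDCap_eq (o w : List Char) : ∀ d, d ≤ 1 → pvDCap o w d = min (pvMis o w + d) 2 := by
  induction o generalizing w with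
  | nil => intro d hd; cases w <;> simp only [pvDCap, pvMis_nil] <;> omega
  | cons a as ih =>
    intro d hd
    cases w with
    | nil => simp only [pvDCap, pvMis_nil']; omega
    | cons b bs =>
      rw [pvMis_cons]
      by_cases hab : a = b
      · simp only [pvDCap]
        rw [if_neg (by simp [hab]), ih bs d hd]
        simp [hab]
      · simp only [pvDCap]
        rw [if_pos hab, if_neg hab]
        interval_cases d
        · rw [if_neg (by omega), ih bs 1 (by omega)]; omega
        · rw [if_pos (by omega)]; omega

lemma pvMis_zero_iff (o w : List Char) (h : o.length = w.length) : pvMis o w = 0 ↔ o = w := by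
  induction o generalizing w with
  | nil => cases w with
    | nil => simp [pvMis_nil]
    | cons b bs => simp at h
  | cons a as ih =>
    cases w with
    | nil => simp at h
    | cons b bs =>
      simp only [List.length_cons, Nat.add_right_cancel_iff] at h
      rw [pvMis_cons]
      constructor
      · intro hz
        have hab : a = b := by by_contra hab; simp [hab] at hz
        have : pvMis as bs = 0 := by simp [hab] at hz; omega
        rw [hab, (ih bs h).mp this]
      · rintro heq
        injection heq with h1 h2
        subst h1; subst h2
        simp [(ih _ h).mpr rfl]

lemma pvMisA_eq (o w : List Char) : pvMisA o w = (pvMis o w : Int) := by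
  rw [pvMisA, pvMis, PySem.List.sum_map_const_int, List.countP_eq_length_filter]
  simp

-- a full-length window matches exactly iff the oligo is a prefix of the suffix at i
lemma pvMis_zero_prefix (o r : List Char) (i : Nat) (h : i + o.length ≤ r.length) :
    pvMis o ((r.drop i).take o.length) = 0 ↔ o <+: r.drop i := by
  have hl : ((r.drop i).take o.length).length = o.length := by
    simp; omega
  rw [List.prefix_iff_eq_take, pvMis_zero_iff o _ hl.symm]

-- once 'near' is set and no exact window remains, B's scan just runs to the end
lemma pvLoopB_pending (o r : List Char) (n : Int) :
    ∀ is : List Nat, (∀ i ∈ is, pvDCap o ((r.drop i).take o.length) 0 ≠ 0) →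
    pvLoopB o r (some n) is = (some n, some 1) := by
  intro is
  induction is with
  | nil => intro _; simp [pvLoopB]
  | cons i rest ih =>
    intro hno
    have hi := hno i (by simp)
    simp only [pvLoopB]
    rw [if_neg hi, if_neg (by simp)]
    exact ih (fun j hj => hno j (by simp [hj]))

-- with no exact window anywhere, A's approximate pass and B's scan agree
lemma pvLoopA_eq_loopB (o r : List Char) :
    ∀ is : List Nat, (∀ i ∈ is, pvMis o ((r.drop i).take o.length) ≠ 0) →
    pvLoopA o r (List.map Nat.cast is) = pvLoopB o r none is := by
  intro is
  induction is with
  | nil => intro _; simp [pvLoopA, pvLoopB]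
  | cons i rest ih =>
    intro hno
    have hmi := hno i (by simp)
    have hrest : ∀ j ∈ rest, pvMis o ((r.drop j).take o.length) ≠ 0 :=
      fun j hj => hno j (by simp [hj])
    have hdrest : ∀ j ∈ rest, pvDCap o ((r.drop j).take o.length) 0 ≠ 0 := by
      intro j hj
      rw [pvDCap_eq o _ 0 (by omega)]
      have := hrest j hj; omega
    rw [List.map_cons]
    simp only [pvLoopA, pvLoopB]
    rw [PySem.List.slice_natCast_add, pvMisA_eq]
    rw [pvDCap_eq o _ 0 (by omega)]
    by_cases h1 : pvMis o ((r.drop i).take o.length) = 1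
    · rw [if_pos (by rw [h1]; norm_num), if_neg (by omega), if_pos (by simp; omega)]
      exact (pvLoopB_pending o r i rest hdrest).symm
    · rw [if_neg (by omega), if_neg (by omega), if_neg (by simp; omega)]
      exact ih hrest

-- B's scan returns (p, 0) at the first exact window p, whatever 'near' holds
lemma pvLoopB_exact (o r : List Char) (p : Nat)
    (hp : pvDCap o ((r.drop p).take o.length) 0 = 0) :
    ∀ (l1 : List Nat) (l2 : List Nat) (near : Option Int),
      (∀ i ∈ l1, pvDCap o ((r.drop i).take o.length) 0 ≠ 0) →
      pvLoopB o r near (l1 ++ p :: l2) = (some (p : Int), some 0) := by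
  intro l1
  induction l1 with
  | nil => intro l2 near _; simp [pvLoopB, hp]
  | cons i rest ih =>
    intro l2 near hno
    have hi := hno i (by simp)
    simp only [List.cons_append, pvLoopB]
    rw [if_neg hi]
    split
    · exact ih l2 _ (fun j hj => hno j (by simp [hj]))
    · exact ih l2 _ (fun j hj => hno j (by simp [hj]))

theorem pv_main (oligo ref_seq : String) :
    align_oligo_to_ref oligo ref_seq = align_oligo_to_ref_alt oligo ref_seq := by
  set o := oligo.toList with ho
  set r := ref_seq.toList with hr
  have hfind : PySem.Str.find ref_seq oligo = PySem.Chars.find r o := by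
    simp [ho, hr]
  by_cases h : PySem.Chars.find r o = -1
  · -- no exact match anywhere
    have hninf : ¬ o <:+: r := (PySem.Chars.find_eq_neg_one_iff r o).mp h
    have hnopre : ∀ j : Nat, ¬ o <+: r.drop j := by
      intro j hpre
      exact hninf (hpre.isInfix.trans (r.drop_suffix j).isInfix)
    rw [align_oligo_to_ref, align_oligo_to_ref_alt]
    simp only [← ho, ← hr, hfind, h]
    rw [if_neg (by simp)]
    by_cases hm : o.length ≤ r.length + 1
    · have hstop : (r.length : Int) - (o.length : Int) + 1
          = ((r.length + 1 - o.length : Nat) : Int) := by omega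
      rw [hstop, PySem.List.pyRange_zero_natCast]
      have := pvLoopA_eq_loopB o r (List.range (r.length + 1 - o.length)) ?_
      · exact this
      · intro i hi
        rw [List.mem_range] at hi
        have hle : i + o.length ≤ r.length := by omega
        rw [Ne, pvMis_zero_prefix o r i hle]
        exact hnopre i
    · have hN : r.length + 1 - o.length = 0 := by omega
      have hstop : PySem.List.pyRange 0 ((r.length : Int) - (o.length : Int) + 1) 1 = [] := by
        simp [PySem.List.pyRange]; omega
      rw [hN, hstop]
      simp [pvLoopA, pvLoopB]
  · -- exact match: find points at the first exact window
    have h0 : 0 ≤ PySem.Chars.find r o := by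
      have := PySem.Chars.neg_one_le_find r o; omega
    obtain ⟨hpre, hmin⟩ := PySem.Chars.find_spec h0
    set pn := (PySem.Chars.find r o).toNat with hpn
    have hlen : pn + o.length ≤ r.length := by
      have h1 := hpre.length_le
      have h2 := PySem.Chars.find_le_length r o
      simp at h1
      omega
    rw [align_oligo_to_ref, align_oligo_to_ref_alt]
    simp only [← ho, ← hr, hfind]
    rw [if_pos (by simp [h])]
    have hNsplit : List.range (r.length + 1 - o.length)
        = List.range pn ++ pn :: List.range' (pn + 1) (r.length - o.length - pn) := by
      rw [List.range_eq_range']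
      rw [show r.length + 1 - o.length = pn + ((r.length - o.length - pn) + 1) by omega]
      rw [← List.range'_append (s := 0) (m := pn) (n := (r.length - o.length - pn) + 1) (step := 1)]
      simp [List.range_eq_range', List.range'_succ]
    rw [hNsplit]
    have hp0 : pvDCap o ((r.drop pn).take o.length) 0 = 0 := by
      rw [pvDCap_eq o _ 0 (by omega)]
      have : pvMis o ((r.drop pn).take o.length) = 0 :=
        (pvMis_zero_prefix o r pn hlen).mpr hpre
      omega
    rw [pvLoopB_exact o r pn hp0 (List.range pn) _ none ?_]
    · have : ((pn : Int)) = PySem.Chars.find r o := by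
        rw [hpn]; exact Int.toNat_of_nonneg h0
      rw [this]
    · intro i hi
      rw [List.mem_range] at hi
      rw [pvDCap_eq o _ 0 (by omega)]
      have hle : i + o.length ≤ r.length := by omega
      have : pvMis o ((r.drop i).take o.length) ≠ 0 := by
        rw [Ne, pvMis_zero_prefix o r i hle]
        exact hmin i hi
      omega

-- ===== VERDICT (by name: the statement is the Claim_ definition above) =====
theorem align_oligo_to_ref_spec : Claim_equal_align_oligo_to_ref := by
  intro oligo ref_seq _
  unfold Spec_align_oligo_to_ref
  exact pv_main oligo ref_seq
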